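-- pv_equiv track=rewrite | github.com/rhseung/ps | boj.py | _pick_language_id
-- ===== SOURCE A (Python) =====
-- def _pick_language_id(langs_map: dict[str, str], prefer: str) -> str:
--     prefer = (prefer or '').lower()
--     items = list(langs_map.items())
--
--     def find_contains(keys: list[str]):
--         for label, val in items:
--             low = label.lower()
--             if any(k in low for k in keys):
--                 return val
--         return ""
--
--     def find_exact(keys: list[str]):
--         for label, val in items:
--             low = label.lower()
--             if any(low == k for k in keys):
--                 return val
--         return ""
--
--     if prefer == 'cpp' or prefer == 'c++':
--         # C++ 언어 우선순위: 최신 버전부터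
--         v = (find_exact(["c++23", "c++20", "c++17", "c++14", "c++11"]) or
--              find_contains(["gnu++23", "gnu++20", "gnu++17", "gnu++14", "gnu++11"]) or
--              find_contains(["c++23", "c++20", "c++17", "c++14", "c++11", "c++", "gnu++"]))
--         if v:
--             return v
--     elif prefer == 'py' or prefer == 'python':
--         # Python 언어 우선순위: PyPy3 > Python 3
--         v = (find_contains(["pypy3"]) or
--              find_contains(["python 3", "python3"]) or
--              find_contains(["python"]))
--         if v:
--             return v
--     elif prefer == 'java':
--         v = find_contains(["java", "openjdk"])
--         if v:
--             return v
--     elif prefer == 'js' or prefer == 'javascript':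
--         v = find_contains(["node.js", "javascript"])
--         if v:
--             return v
--
--     # 찾지 못했으면 첫 번째 유효한 언어 반환
--     return next(iter(langs_map.values()), "")
-- ===== SOURCE B (Python) =====
-- _TIERS = {
--     'cpp': [('exact', ["c++23", "c++20", "c++17", "c++14", "c++11"]),
--             ('contains', ["gnu++23", "gnu++20", "gnu++17", "gnu++14", "gnu++11"]),
--             ('contains', ["c++23", "c++20", "c++17", "c++14", "c++11", "c++", "gnu++"])],
--     'py': [('contains', ["pypy3"]),
--            ('contains', ["python 3", "python3"]),
--            ('contains', ["python"])],
--     'java': [('contains', ["java", "openjdk"])],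
--     'js': [('contains', ["node.js", "javascript"])],
-- }
-- _ALIAS = {'c++': 'cpp', 'python': 'py', 'javascript': 'js'}
--
--
-- def _pick_language_id(langs_map: dict[str, str], prefer: str) -> str:
--     p = (prefer or '').lower()
--     tiers = _TIERS.get(_ALIAS.get(p, p), [])
--     # one pass over the items: remember, per tier, the value of its FIRST matching item
--     firsts = [None] * len(tiers)
--     for label, val in langs_map.items():
--         low = label.lower()
--         for i, (mode, keys) in enumerate(tiers):
--             if firsts[i] is None and any(
--                     (low == k) if mode == 'exact' else (k in low) for k in keys):
--                 firsts[i] = val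
--     for v in firsts:
--         if v:  # skip unmatched tiers and empty-string values, like A's `or` chain
--             return v
--     return next(iter(langs_map.values()), "")
-- ===== Notes on version B (the rewrite author's own statement) =====
-- stated objective: alternative
-- what changed: Replaces A's per-tier rescans (each find_exact/find_contains helper walks the whole items list again, chained with `or`) by a static tier table and a single pass over the items that records, per tier, the value of its first matching item, then returns the first truthy per-tier value.
import Mathlib
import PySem

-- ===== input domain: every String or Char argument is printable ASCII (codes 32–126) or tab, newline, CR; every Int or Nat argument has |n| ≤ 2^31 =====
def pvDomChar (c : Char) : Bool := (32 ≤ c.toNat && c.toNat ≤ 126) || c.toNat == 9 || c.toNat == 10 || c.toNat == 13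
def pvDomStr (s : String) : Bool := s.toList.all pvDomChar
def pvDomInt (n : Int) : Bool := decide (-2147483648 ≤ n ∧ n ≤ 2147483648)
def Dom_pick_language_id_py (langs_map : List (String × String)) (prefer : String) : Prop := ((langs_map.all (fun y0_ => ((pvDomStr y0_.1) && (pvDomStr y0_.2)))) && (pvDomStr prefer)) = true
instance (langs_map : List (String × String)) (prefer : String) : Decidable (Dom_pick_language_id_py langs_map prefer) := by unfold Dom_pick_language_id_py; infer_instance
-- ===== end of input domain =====

-- B replaces A's per-tier rescans of the items by a static tier table and a single pass that
-- records each tier's first matching value; objective: alternative (same cost class, one pass).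

-- ===== PORT A =====
-- Python 'a or b' on strings
def pvStrOr (a b : String) : String := if a ≠ "" then a else b

def pvFindContains (items : List (String × String)) (keys : List String) : String :=
  match items with
  | [] => ""
  | (label, v) :: rest =>
      if keys.any (fun k => PySem.Str.isIn k (PySem.Str.lower label)) then v
      else pvFindContains rest keys

def pvFindExact (items : List (String × String)) (keys : List String) : String :=
  match items with
  | [] => ""
  | (label, v) :: rest =>
      if keys.any (fun k => PySem.Str.lower label == k) then v
      else pvFindExact rest keys

def pick_language_id_py (langs_map : List (String × String)) (prefer : String) : String :=
  let p := PySem.Str.lower prefer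
  let items := (PySem.Dict.ofList langs_map).items
  let fallback := match (PySem.Dict.ofList langs_map).values with | [] => "" | v :: _ => v
  if p == "cpp" || p == "c++" then
    let v := pvStrOr (pvFindExact items ["c++23", "c++20", "c++17", "c++14", "c++11"])
      (pvStrOr (pvFindContains items ["gnu++23", "gnu++20", "gnu++17", "gnu++14", "gnu++11"])
        (pvFindContains items ["c++23", "c++20", "c++17", "c++14", "c++11", "c++", "gnu++"]))
    if v ≠ "" then v else fallback
  else if p == "py" || p == "python" then
    let v := pvStrOr (pvFindContains items ["pypy3"])
      (pvStrOr (pvFindContains items ["python 3", "python3"])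
        (pvFindContains items ["python"]))
    if v ≠ "" then v else fallback
  else if p == "java" then
    let v := pvFindContains items ["java", "openjdk"]
    if v ≠ "" then v else fallback
  else if p == "js" || p == "javascript" then
    let v := pvFindContains items ["node.js", "javascript"]
    if v ≠ "" then v else fallback
  else fallback

-- ===== PORT B =====
-- mode = true : exact, mode = false : contains
def pvMatch (mode : Bool) (keys : List String) (low : String) : Bool :=
  keys.any (fun k => if mode then low == k else PySem.Str.isIn k low)

def pvTiers (p : String) : List (Bool × List String) :=
  if p == "cpp" || p == "c++" then
    [(true, ["c++23", "c++20", "c++17", "c++14", "c++11"]),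
     (false, ["gnu++23", "gnu++20", "gnu++17", "gnu++14", "gnu++11"]),
     (false, ["c++23", "c++20", "c++17", "c++14", "c++11", "c++", "gnu++"])]
  else if p == "py" || p == "python" then
    [(false, ["pypy3"]), (false, ["python 3", "python3"]), (false, ["python"])]
  else if p == "java" then [(false, ["java", "openjdk"])]
  else if p == "js" || p == "javascript" then [(false, ["node.js", "javascript"])]
  else []

-- one item updates the per-tier 'first match' slots
def pvStep (tiers : List (Bool × List String)) (fs : List (Option String))
    (lv : String × String) : List (Option String) :=
  let low := PySem.Str.lower lv.1
  (tiers.zip fs).map (fun tf => if tf.2.isNone && pvMatch tf.1.1 tf.1.2 low then some lv.2 else tf.2)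

def pvFirstTruthy : List (Option String) → Option String
  | [] => none
  | none :: rest => pvFirstTruthy rest
  | some v :: rest => if v ≠ "" then some v else pvFirstTruthy rest

def pick_language_id_py_alt (langs_map : List (String × String)) (prefer : String) : String :=
  let p := PySem.Str.lower prefer
  let tiers := pvTiers p
  let items := (PySem.Dict.ofList langs_map).items
  let firsts := items.foldl (pvStep tiers) (tiers.map (fun _ => none))
  match pvFirstTruthy firsts with
  | some v => v
  | none => match (PySem.Dict.ofList langs_map).values with | [] => "" | v :: _ => v

-- ===== PRECONDITION & SPEC =====
def Spec_pick_language_id_py (langs_map : List (String × String)) (prefer : String) (out : String) : Prop := out = pick_language_id_py_alt langs_map prefer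
instance (langs_map : List (String × String)) (prefer : String) (out : String) : Decidable (Spec_pick_language_id_py langs_map prefer out) := by unfold Spec_pick_language_id_py; infer_instance

-- ===== CLAIM (what is proved, stated in full; the proofs are below) =====
def Claim_equal_pick_language_id_py : Prop := ∀ (langs_map : List (String × String)) (prefer : String), Dom_pick_language_id_py langs_map prefer → Spec_pick_language_id_py langs_map prefer (pick_language_id_py langs_map prefer)

-- ===== LEMMAS AND PROOFS =====

-- the value of the first item matching tier t, if any
def pvFirstMatch (items : List (String × String)) (t : Bool × List String) : Option String :=
  match items with
  | [] => none
  | (label, v) :: rest =>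
      if pvMatch t.1 t.2 (PySem.Str.lower label) then some v else pvFirstMatch rest t

theorem pvStep_map (tiers : List (Bool × List String)) (g : Bool × List String → Option String)
    (lv : String × String) :
    pvStep tiers (tiers.map g) lv =
      tiers.map (fun t => if (g t).isNone && pvMatch t.1 t.2 (PySem.Str.lower lv.1)
        then some lv.2 else g t) := by
  unfold pvStep
  induction tiers with
  | nil => simp
  | cons t ts ih => simp_all [List.zip_cons_cons]

theorem pvFold_eq (tiers : List (Bool × List String)) (items : List (String × String))
    (g : Bool × List String → Option String) :
    items.foldl (pvStep tiers) (tiers.map g) =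
      tiers.map (fun t => (g t).or (pvFirstMatch items t)) := by
  induction items generalizing g with
  | nil => simp [pvFirstMatch]
  | cons lv rest ih =>
      rw [List.foldl_cons, pvStep_map, ih]
      apply List.map_congr_left
      intro t _
      cases h : g t with
      | some v => simp [pvFirstMatch]
      | none =>
          simp only [Option.isNone_none, Bool.true_and, Option.none_or, pvFirstMatch]
          split <;> simp

theorem pvFindExact_eq (items : List (String × String)) (keys : List String) :
    pvFindExact items keys = (pvFirstMatch items (true, keys)).getD "" := by
  induction items with
  | nil => rfl
  | cons lv rest ih =>
      obtain ⟨label, v⟩ := lv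
      show (if keys.any (fun k => PySem.Str.lower label == k) then v else pvFindExact rest keys)
          = (if pvMatch true keys (PySem.Str.lower label) then some v
             else pvFirstMatch rest (true, keys)).getD ""
      have h : pvMatch true keys (PySem.Str.lower label)
          = keys.any (fun k => PySem.Str.lower label == k) := rfl
      rw [h]
      split
      · rfl
      · exact ih

theorem pvFindContains_eq (items : List (String × String)) (keys : List String) :
    pvFindContains items keys = (pvFirstMatch items (false, keys)).getD "" := by
  induction items with
  | nil => rfl
  | cons lv rest ih =>
      obtain ⟨label, v⟩ := lv
      show (if keys.any (fun k => PySem.Str.isIn k (PySem.Str.lower label)) then v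
            else pvFindContains rest keys)
          = (if pvMatch false keys (PySem.Str.lower label) then some v
             else pvFirstMatch rest (false, keys)).getD ""
      have h : pvMatch false keys (PySem.Str.lower label)
          = keys.any (fun k => PySem.Str.isIn k (PySem.Str.lower label)) := rfl
      rw [h]
      split
      · rfl
      · exact ih

theorem pvFold3 (t1 t2 t3 : Bool × List String) (items : List (String × String)) :
    items.foldl (pvStep [t1, t2, t3]) [none, none, none]
      = [pvFirstMatch items t1, pvFirstMatch items t2, pvFirstMatch items t3] := by
  simpa using pvFold_eq [t1, t2, t3] items (fun _ => none)

theorem pvFold1 (t1 : Bool × List String) (items : List (String × String)) :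
    items.foldl (pvStep [t1]) [none] = [pvFirstMatch items t1] := by
  simpa using pvFold_eq [t1] items (fun _ => none)

theorem pvFold0 (items : List (String × String)) :
    items.foldl (pvStep []) ([] : List (Option String)) = [] := by
  simpa using pvFold_eq [] items (fun _ => none)

theorem pvChain3 (m1 m2 m3 : Option String) (fb : String) :
    (if pvStrOr (m1.getD "") (pvStrOr (m2.getD "") (m3.getD "")) ≠ "" then
        pvStrOr (m1.getD "") (pvStrOr (m2.getD "") (m3.getD ""))
      else fb) =
      (match pvFirstTruthy [m1, m2, m3] with | some v => v | none => fb) := by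
  cases m1 <;> cases m2 <;> cases m3 <;>
    simp only [pvStrOr, pvFirstTruthy, Option.getD_none, Option.getD_some] <;>
    split_ifs <;> simp_all

theorem pvChain1 (m1 : Option String) (fb : String) :
    (if m1.getD "" ≠ "" then m1.getD "" else fb) =
      (match pvFirstTruthy [m1] with | some v => v | none => fb) := by
  cases m1 <;> simp only [pvFirstTruthy, Option.getD_none, Option.getD_some] <;>
    split_ifs <;> simp_all

-- ===== VERDICT (by name: the statement is the Claim_ definition above) =====
theorem pick_language_id_py_spec : Claim_equal_pick_language_id_py := by
  intro langs_map prefer _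
  unfold Spec_pick_language_id_py pick_language_id_py pick_language_id_py_alt pvTiers
  set p := PySem.Str.lower prefer with hp
  set items := (PySem.Dict.ofList langs_map).items with hitems
  set fb := (match (PySem.Dict.ofList langs_map).values with | [] => "" | v :: _ => v) with hfb
  by_cases h1 : (p == "cpp" || p == "c++") = true
  · simp only [h1, if_true, List.map_cons, List.map_nil, pvFold3, pvFindExact_eq, pvFindContains_eq, pvChain3]
  by_cases h2 : (p == "py" || p == "python") = true
  · simp only [h1, h2, if_true, if_false, Bool.false_eq_true, List.map_cons, List.map_nil, pvFold3, pvFindContains_eq,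
      pvChain3]
  by_cases h3 : (p == "java") = true
  · simp only [h1, h2, h3, if_true, if_false, Bool.false_eq_true, List.map_cons, List.map_nil, pvFold1, pvFindContains_eq,
      pvChain1]
  by_cases h4 : (p == "js" || p == "javascript") = true
  · simp only [h1, h2, h3, h4, if_true, if_false, Bool.false_eq_true, List.map_cons, List.map_nil, pvFold1, pvFindContains_eq,
      pvChain1]
  · simp only [h1, h2, h3, h4, if_false, Bool.false_eq_true, List.map_nil, pvFold0, pvFirstTruthy]
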